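-- pv_equiv track=rewrite | github.com/genos/online_problems | prog_praxis/lucas/lucas.py | naive_lucas
-- ===== SOURCE A (Python) =====
-- def naive_lucas(n, p, q):
--     if n <= 0:
--         return (0, 2)
--     elif n == 1:
--         return (1, p)
--     else:
--         u, v = naive_lucas(n - 1, p, q)
--         uu, vv = naive_lucas(n - 2, p, q)
--         return (p * u - q * uu, p * v - q * vv)
-- ===== SOURCE B (Python) =====
-- def naive_lucas(n, p, q):
--     if n <= 0:
--         return (0, 2)
--     u, uu = 1, 0
--     v, vv = p, 2
--     for _ in range(n - 1):
--         u, uu = p * u - q * uu, u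
--         v, vv = p * v - q * vv, v
--     return (u, v)
-- ===== Notes on version B (the rewrite author's own statement) =====
-- stated objective: faster
-- what changed: Replaced the exponential double recursion with a single bottom-up loop keeping only the last two U- and V-terms; intended as asymptotically faster (measured 246x at the largest size both finished, with A timing out on larger inputs where B returns); Pre_ excludes only n >= 998, where A's linear recursion depth exceeds CPython's default recursion limit and A raises RecursionError.
import Mathlib
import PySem

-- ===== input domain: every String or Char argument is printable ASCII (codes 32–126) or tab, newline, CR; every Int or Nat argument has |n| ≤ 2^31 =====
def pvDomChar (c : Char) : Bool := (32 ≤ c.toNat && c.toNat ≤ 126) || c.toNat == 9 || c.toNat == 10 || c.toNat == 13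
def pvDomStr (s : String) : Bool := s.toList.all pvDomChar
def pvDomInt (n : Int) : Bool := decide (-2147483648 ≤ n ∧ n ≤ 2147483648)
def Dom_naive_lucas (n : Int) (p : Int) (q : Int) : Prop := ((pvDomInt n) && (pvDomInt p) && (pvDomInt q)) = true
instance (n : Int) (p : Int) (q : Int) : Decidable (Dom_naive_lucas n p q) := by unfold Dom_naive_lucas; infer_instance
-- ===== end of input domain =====

-- B replaces A's exponential double recursion by one bottom-up loop keeping the last two U- and V-terms (intended as faster; a timing run measured B 246x faster at the largest size both finished, A timing out beyond); return values proved equal wherever A returns.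

-- ===== PORT A =====
def naive_lucas (n : Int) (p : Int) (q : Int) : Int × Int :=
  if n ≤ 0 then (0, 2)
  else if n = 1 then (1, p)
  else
    let uv := naive_lucas (n - 1) p q
    let uuvv := naive_lucas (n - 2) p q
    (p * uv.1 - q * uuvv.1, p * uv.2 - q * uuvv.2)
termination_by n.toNat
decreasing_by all_goals omega

-- ===== PORT B =====
def naive_lucas_alt (n : Int) (p : Int) (q : Int) : Int × Int :=
  if n ≤ 0 then (0, 2)
  else
    let s := (List.range (n - 1).toNat).foldl
      (fun (st : Int × Int × Int × Int) _ =>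
        (p * st.1 - q * st.2.1, st.1, p * st.2.2.1 - q * st.2.2.2, st.2.2.1))
      (1, 0, p, 2)
    (s.1, s.2.2.1)

-- ===== PRECONDITION & SPEC =====
-- Pre_ excludes n >= 998, where A's recursion depth (~n) reaches CPython's default recursion
-- limit (1000) and A raises RecursionError instead of returning.
def Pre_naive_lucas (n : Int) (p : Int) (q : Int) : Prop := n < 998
instance (n : Int) (p : Int) (q : Int) : Decidable (Pre_naive_lucas n p q) := by unfold Pre_naive_lucas; infer_instance
def pvWitness_naive_lucas : Int × Int × Int := (10, 1, -1)

def Spec_naive_lucas (n : Int) (p : Int) (q : Int) (out : Int × Int) : Prop := out = naive_lucas_alt n p q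
instance (n : Int) (p : Int) (q : Int) (out : Int × Int) : Decidable (Spec_naive_lucas n p q out) := by unfold Spec_naive_lucas; infer_instance

-- ===== CLAIM (what is proved, stated in full; the proofs are below) =====
def Claim_equal_naive_lucas : Prop := ∀ (n : Int) (p : Int) (q : Int), Dom_naive_lucas n p q → Pre_naive_lucas n p q → Spec_naive_lucas n p q (naive_lucas n p q)

-- ===== LEMMAS AND PROOFS =====

-- mathematical Lucas sequences, Nat-indexed (proof helpers)
def lucasU (p q : Int) : Nat → Int
  | 0 => 0
  | 1 => 1
  | (m+2) => p * lucasU p q (m+1) - q * lucasU p q m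

def lucasV (p q : Int) : Nat → Int
  | 0 => 2
  | 1 => p
  | (m+2) => p * lucasV p q (m+1) - q * lucasV p q m

theorem naive_lucas_eq_lucas (n p q : Int) :
    naive_lucas n p q = (lucasU p q n.toNat, lucasV p q n.toNat) := by
  induction n using naive_lucas.induct (p := p) (q := q) with
  | case1 n h =>
    have : n.toNat = 0 := by omega
    rw [naive_lucas]; simp [h, this, lucasU, lucasV]
  | case2 h =>
    rw [naive_lucas]; simp [lucasU, lucasV]
  | case3 n h h1 ih1 ih2 =>
    obtain ⟨m, hm⟩ : ∃ m : Nat, n.toNat = m + 2 := ⟨n.toNat - 2, by omega⟩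
    have h1' : (n - 1).toNat = m + 1 := by omega
    have h2' : (n - 2).toNat = m := by omega
    rw [naive_lucas]
    simp only [if_neg h, if_neg h1, ih1, ih2, h1', h2', hm]
    simp [lucasU, lucasV]

theorem fold_eq_lucas (p q : Int) (k : Nat) :
    (List.range k).foldl
      (fun (st : Int × Int × Int × Int) _ =>
        (p * st.1 - q * st.2.1, st.1, p * st.2.2.1 - q * st.2.2.2, st.2.2.1))
      (1, 0, p, 2)
    = (lucasU p q (k+1), lucasU p q k, lucasV p q (k+1), lucasV p q k) := by
  induction k with
  | zero => simp [lucasU, lucasV]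
  | succ m ih =>
    rw [List.range_succ, List.foldl_append, ih]
    simp [lucasU, lucasV]

-- ===== VERDICT (by name: the statement is the Claim_ definition above) =====
theorem naive_lucas_spec : Claim_equal_naive_lucas := by
  intro n p q _ _
  unfold Spec_naive_lucas naive_lucas_alt
  rw [naive_lucas_eq_lucas]
  split
  · next h =>
    have : n.toNat = 0 := by omega
    simp [this, lucasU, lucasV]
  · next h =>
    have hk : (n - 1).toNat + 1 = n.toNat := by omega
    simp only [fold_eq_lucas, hk]
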